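-- pv_equiv track=rewrite | github.com/guilopesrbc/listasP1 | lista05/01.py | contagem_barra_1
-- ===== SOURCE A (Python) =====
-- def contagem_barra_1(ep,x):
--     # caso seja o ultimo termo
--     if x == (len(ep) - 1):
--         # caso base
--         if ep[x] != '(':
--             return 0
--         else:
--             return 1
--     else:
--         if ep[x] != '(':
--             return 0 + contagem_barra_1(ep,x+1)
--         else:
--             return 1 + contagem_barra_1(ep,x+1)
-- ===== SOURCE B (Python) =====
-- def contagem_barra_1(ep, x):
--     total = 0
--     i = x
--     while i != len(ep) - 1:
--         if ep[i] == '(':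
--             total += 1
--         i += 1
--     if ep[i] == '(':
--         total += 1
--     return total
-- ===== Notes on version B (the rewrite author's own statement) =====
-- stated objective: alternative
-- what changed: Replaces A's linear recursion with an iterative while-loop over the same index sequence, carrying an integer accumulator instead of building a chain of additions.
-- outside the precondition, e.g. on contagem_barra_1('', -1): A raises IndexError, B raises IndexError; on contagem_barra_1('()', 5): A raises IndexError, B raises IndexError
import Mathlib
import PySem

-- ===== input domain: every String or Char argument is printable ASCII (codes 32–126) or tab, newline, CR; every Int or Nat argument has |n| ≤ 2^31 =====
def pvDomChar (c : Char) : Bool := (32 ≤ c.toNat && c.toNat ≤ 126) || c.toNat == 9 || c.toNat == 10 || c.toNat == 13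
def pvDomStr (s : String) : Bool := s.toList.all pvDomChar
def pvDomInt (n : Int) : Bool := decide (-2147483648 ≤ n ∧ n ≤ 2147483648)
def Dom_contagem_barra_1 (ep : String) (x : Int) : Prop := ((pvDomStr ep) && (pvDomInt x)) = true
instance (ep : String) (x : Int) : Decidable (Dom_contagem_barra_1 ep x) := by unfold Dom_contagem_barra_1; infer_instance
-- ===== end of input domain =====

-- B replaces A's linear recursion with an iterative index loop and an accumulator; same cost,
-- different decomposition. Equivalence is about the return value on inputs where A raises no IndexError.

-- ===== PORT A =====
-- A's recursion, fuel bounds the number of recursive steps (exactly enough on Pre_);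
-- pyGet? = none is Python's IndexError (outside Pre_), the port returns 0 there.
def contagem_barra_1_go (cs : List Char) (x : Int) (fuel : Nat) : Int :=
  if x = (cs.length : Int) - 1 then
    match PySem.List.pyGet? cs x with
    | some c => if c ≠ '(' then 0 else 1
    | none => 0
  else
    match fuel with
    | 0 => 0
    | fuel' + 1 =>
      match PySem.List.pyGet? cs x with
      | some c => (if c ≠ '(' then 0 else 1) + contagem_barra_1_go cs (x + 1) fuel'
      | none => 0

def contagem_barra_1 (ep : String) (x : Int) : Int :=
  contagem_barra_1_go ep.toList x ((ep.toList.length : Int) - 1 - x).toNat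

-- ===== PORT B =====
-- B's while-loop: accumulator `total`, index `i`, terminates at i = len-1, then the final index.
def contagem_barra_1_alt_go (cs : List Char) (i : Int) (total : Int) (fuel : Nat) : Int :=
  if i ≠ (cs.length : Int) - 1 then
    match fuel with
    | 0 => total
    | fuel' + 1 =>
      match PySem.List.pyGet? cs i with
      | some c => contagem_barra_1_alt_go cs (i + 1) (total + if c = '(' then 1 else 0) fuel'
      | none => total
  else
    match PySem.List.pyGet? cs i with
    | some c => total + (if c = '(' then 1 else 0)
    | none => total

def contagem_barra_1_alt (ep : String) (x : Int) : Int :=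
  contagem_barra_1_alt_go ep.toList x 0 ((ep.toList.length : Int) - 1 - x).toNat

-- ===== PRECONDITION & SPEC =====
-- Pre_ excludes exactly the inputs where Python A raises IndexError: empty string,
-- or a start index outside [-len, len-1] (negative indices wrap, as in Python).
def Pre_contagem_barra_1 (ep : String) (x : Int) : Prop :=
  0 < ep.toList.length ∧ -(ep.toList.length : Int) ≤ x ∧ x ≤ (ep.toList.length : Int) - 1
instance (ep : String) (x : Int) : Decidable (Pre_contagem_barra_1 ep x) := by
  unfold Pre_contagem_barra_1; infer_instance

def pvWitness_contagem_barra_1 : String × Int := ("(a(", 0)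

def Spec_contagem_barra_1 (ep : String) (x : Int) (out : Int) : Prop := out = contagem_barra_1_alt ep x
instance (ep : String) (x : Int) (out : Int) : Decidable (Spec_contagem_barra_1 ep x out) := by
  unfold Spec_contagem_barra_1; infer_instance

-- ===== CLAIM (what is proved, stated in full; the proofs are below) =====
def Claim_equal_contagem_barra_1 : Prop := ∀ (ep : String) (x : Int), Dom_contagem_barra_1 ep x → Pre_contagem_barra_1 ep x → Spec_contagem_barra_1 ep x (contagem_barra_1 ep x)

-- ===== LEMMAS AND PROOFS =====
-- Loop/recursion correspondence: B's accumulator loop computes total + A's recursion,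
-- for any index, any accumulator and any fuel.
theorem alt_go_eq_go (cs : List Char) (fuel : Nat) :
    ∀ (i total : Int),
      contagem_barra_1_alt_go cs i total fuel = total + contagem_barra_1_go cs i fuel := by
  induction fuel with
  | zero =>
    intro i total
    unfold contagem_barra_1_alt_go contagem_barra_1_go
    by_cases h : i = (cs.length : Int) - 1
    · simp [h]
      cases PySem.List.pyGet? cs ((cs.length : Int) - 1) with
      | none => simp
      | some c => by_cases hc : c = '(' <;> simp [hc]
    · simp [h]
  | succ fuel' ih =>
    intro i total
    unfold contagem_barra_1_alt_go contagem_barra_1_go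
    by_cases h : i = (cs.length : Int) - 1
    · simp [h]
      cases PySem.List.pyGet? cs ((cs.length : Int) - 1) with
      | none => simp
      | some c => by_cases hc : c = '(' <;> simp [hc]
    · simp only [h, if_neg, ne_eq, not_false_iff, if_true]
      cases PySem.List.pyGet? cs i with
      | none => simp
      | some c =>
        simp only [ih]
        by_cases hc : c = '(' <;> simp [hc, add_comm, add_assoc, add_left_comm]

-- ===== VERDICT (by name: the statement is the Claim_ definition above) =====
theorem contagem_barra_1_spec : Claim_equal_contagem_barra_1 := by
  intro ep x _ _
  unfold Spec_contagem_barra_1 contagem_barra_1 contagem_barra_1_alt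
  rw [alt_go_eq_go]
  ring
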